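-- pv_equiv track=rewrite | github.com/Asinski/computer-science | algorithms/search/short-words.py | shortwords
-- ===== SOURCE A (Python) =====
-- def shortwords(words):
--     minlen = len(words[0])
--     for word in words[1:]:
--         if len(word) < minlen:
--             minlen = len(word)
--     ans = []
--     for word in words:
--         if len(word) == minlen:
--             ans.append(word)
--
--     return ' '.join(ans)
-- ===== SOURCE B (Python) =====
-- def shortwords(words):
--     minlen = len(words[0])
--     buckets = {}
--     for word in words:
--         l = len(word)
--         buckets.setdefault(l, []).append(word)
--         if l < minlen:
--             minlen = l
--     return ' '.join(buckets[minlen])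
-- ===== Notes on version B (the rewrite author's own statement) =====
-- stated objective: alternative
-- what changed: Replaces A's two passes (min pass then filter pass) by a single pass that buckets words by length in a dict while tracking the minimum, returning the min-length bucket.
import Mathlib
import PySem

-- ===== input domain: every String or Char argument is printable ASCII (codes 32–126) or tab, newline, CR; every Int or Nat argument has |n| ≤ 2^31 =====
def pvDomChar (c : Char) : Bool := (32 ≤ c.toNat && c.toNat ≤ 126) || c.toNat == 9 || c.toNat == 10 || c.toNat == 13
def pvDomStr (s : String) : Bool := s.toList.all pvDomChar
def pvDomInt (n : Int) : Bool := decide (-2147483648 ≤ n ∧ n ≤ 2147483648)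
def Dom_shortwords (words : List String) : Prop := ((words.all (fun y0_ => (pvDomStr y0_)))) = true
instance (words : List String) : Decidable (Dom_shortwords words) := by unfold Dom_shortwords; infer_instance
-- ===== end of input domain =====

-- B replaces A's two passes (min, then filter) by one pass that buckets words by length
-- in a dict while tracking the minimum length, returning the min-length bucket.

-- ===== PORT A =====
def shortwords (words : List String) : String :=
  match words with
  | [] => ""   -- words[0] raises IndexError in Python; excluded by Pre_
  | w :: rest =>
    let minlen := rest.foldl
      (fun m word => if PySem.Str.len word < m then PySem.Str.len word else m)
      (PySem.Str.len w)
    let ans := (w :: rest).foldl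
      (fun acc word => if PySem.Str.len word = minlen then acc ++ [word] else acc)
      ([] : List String)
    PySem.Str.join " " ans

-- ===== PORT B =====
def shortwords_alt (words : List String) : String :=
  match words with
  | [] => ""   -- len(words[0]) raises IndexError in Python; excluded by Pre_
  | w :: rest =>
    let st := (w :: rest).foldl
      (fun (st : Int × PySem.Dict Int (List String)) word =>
        let l := PySem.Str.len word
        let buckets := st.2.modify l [] (· ++ [word])
        (if l < st.1 then l else st.1, buckets))
      (PySem.Str.len w, PySem.Dict.empty)
    PySem.Str.join " " (st.2.getD st.1 [])

-- ===== PRECONDITION & SPEC =====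
-- Pre_ excludes only the empty list, on which both implementations raise IndexError.
def Pre_shortwords (words : List String) : Prop := words ≠ []
instance (words : List String) : Decidable (Pre_shortwords words) := by unfold Pre_shortwords; infer_instance
def pvWitness_shortwords : List String := (["ab", "c", "de", "x"])

def Spec_shortwords (words : List String) (out : String) : Prop := out = shortwords_alt words
instance (words : List String) (out : String) : Decidable (Spec_shortwords words out) := by unfold Spec_shortwords; infer_instance

-- ===== CLAIM (what is proved, stated in full; the proofs are below) =====
def Claim_equal_shortwords : Prop := ∀ (words : List String), Dom_shortwords words → Pre_shortwords words → Spec_shortwords words (shortwords words)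

-- ===== LEMMAS AND PROOFS =====

-- the pair fold's first component is A's min fold
theorem fst_fold (l : List String) (m : Int) (d : PySem.Dict Int (List String)) :
    (l.foldl (fun (st : Int × PySem.Dict Int (List String)) word =>
        (if PySem.Str.len word < st.1 then PySem.Str.len word else st.1,
         st.2.modify (PySem.Str.len word) [] (· ++ [word]))) (m, d)).1
    = l.foldl (fun m word => if PySem.Str.len word < m then PySem.Str.len word else m) m := by
  induction l generalizing m d with
  | nil => rfl
  | cons x xs ih => simp only [List.foldl_cons]; exact ih _ _

-- the pair fold's second component is the bucket-building fold
theorem snd_fold (l : List String) (m : Int) (d : PySem.Dict Int (List String)) :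
    (l.foldl (fun (st : Int × PySem.Dict Int (List String)) word =>
        (if PySem.Str.len word < st.1 then PySem.Str.len word else st.1,
         st.2.modify (PySem.Str.len word) [] (· ++ [word]))) (m, d)).2
    = l.foldl (fun d word => d.modify (PySem.Str.len word) [] (· ++ [word])) d := by
  induction l generalizing m d with
  | nil => rfl
  | cons x xs ih => simp only [List.foldl_cons]; exact ih _ _

-- the bucket at key k holds exactly the words of length k, in order
theorem getD_bucket (l : List String) (d : PySem.Dict Int (List String)) (k : Int) :
    (l.foldl (fun d word => d.modify (PySem.Str.len word) [] (· ++ [word])) d).getD k []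
    = d.getD k [] ++ l.filter (fun word => decide (PySem.Str.len word = k)) := by
  induction l generalizing d with
  | nil => simp
  | cons x xs ih =>
    simp only [List.foldl_cons, List.filter_cons]
    rw [ih]
    rw [PySem.Dict.getD_modify]
    by_cases h : (x.length : Int) = k
    · subst h; simp
    · simp [h, Ne.symm h]

-- ===== VERDICT (by name: the statement is the Claim_ definition above) =====
theorem shortwords_spec : Claim_equal_shortwords := by
  intro words _ hpre
  match words with
  | [] => exact absurd rfl hpre
  | w :: rest =>
    show shortwords (w :: rest) = shortwords_alt (w :: rest)
    simp only [shortwords, shortwords_alt]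
    rw [fst_fold, snd_fold, getD_bucket]
    simp only [List.foldl_cons, PySem.Dict.getD_empty, List.nil_append,
               lt_self_iff_false, if_false]
    rw [PySem.List.foldl_append_ite_eq_filter]
    simp only [List.filter_cons]
    simp only [decide_eq_true_eq]
    split_ifs <;> simp
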